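-- pv_equiv track=rewrite | github.com/TakaIshikawa/presence | src/evaluation/cost_forecast.py | _infer_content_type
-- ===== SOURCE A (Python) =====
-- KNOWN_CONTENT_TYPES = {
--     "x_post",
--     "x_thread",
--     "x_long_post",
--     "x_visual",
--     "blog_post",
--     "blog_seed",
-- }
--
-- def _infer_content_type(operation_name: str) -> str:
--     parts = [part for part in operation_name.split(".") if part]
--     for part in reversed(parts):
--         if part in KNOWN_CONTENT_TYPES:
--             return part
--     for part in reversed(parts):
--         if part.startswith(("x_", "blog_")):
--             return part
--     return "unknown"
-- ===== SOURCE B (Python) =====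
-- KNOWN_CONTENT_TYPES = {
--     "x_post",
--     "x_thread",
--     "x_long_post",
--     "x_visual",
--     "blog_post",
--     "blog_seed",
-- }
--
-- def _infer_content_type(operation_name: str) -> str:
--     fallback = None
--     for part in reversed([p for p in operation_name.split(".") if p]):
--         if part in KNOWN_CONTENT_TYPES:
--             return part
--         if fallback is None and part.startswith(("x_", "blog_")):
--             fallback = part
--     return fallback if fallback is not None else "unknown"
-- ===== Notes on version B (the rewrite author's own statement) =====
-- stated objective: alternative
-- what changed: Fuses A's two sequential reversed scans into one reversed pass that returns eagerly on an exact match and keeps the first prefix-match as a fallback.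
import Mathlib
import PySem

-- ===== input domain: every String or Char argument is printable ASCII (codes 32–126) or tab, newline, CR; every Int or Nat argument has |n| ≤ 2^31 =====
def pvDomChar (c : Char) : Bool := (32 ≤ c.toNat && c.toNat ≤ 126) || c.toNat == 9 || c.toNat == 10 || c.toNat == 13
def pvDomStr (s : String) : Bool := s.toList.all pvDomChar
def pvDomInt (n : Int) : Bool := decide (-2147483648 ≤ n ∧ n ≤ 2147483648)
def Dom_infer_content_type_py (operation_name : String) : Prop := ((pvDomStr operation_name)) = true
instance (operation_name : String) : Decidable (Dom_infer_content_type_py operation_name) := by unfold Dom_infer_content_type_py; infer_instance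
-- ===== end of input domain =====

-- B fuses A's two sequential reversed scans into one reversed pass with an eager
-- return on exact matches and a fallback variable for the first prefix match (alternative decomposition).

-- ===== PORT A =====
def pvKnownContentTypes : PySem.Set String :=
  PySem.Set.ofList ["x_post", "x_thread", "x_long_post", "x_visual", "blog_post", "blog_seed"]

-- first 'for part in reversed(parts): if part in KNOWN_CONTENT_TYPES: return part'
def pvScanKnown : List String → Option String
  | [] => none
  | p :: rest => if PySem.Set.contains pvKnownContentTypes p then some p else pvScanKnown rest

-- second 'for part in reversed(parts): if part.startswith(("x_","blog_")): return part'
def pvScanPrefix : List String → Option String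
  | [] => none
  | p :: rest =>
      if PySem.Str.startswith p "x_" || PySem.Str.startswith p "blog_" then some p
      else pvScanPrefix rest

def infer_content_type_py (operation_name : String) : String :=
  let parts := ((PySem.Str.split? operation_name ".").getD []).filter (fun p => p ≠ "")
  match pvScanKnown parts.reverse with
  | some p => p
  | none =>
    match pvScanPrefix parts.reverse with
    | some p => p
    | none => "unknown"

-- ===== PORT B =====
-- single reversed pass carrying the fallback variable
def pvFusedLoop : List String → Option String → String
  | [], fallback => match fallback with | some f => f | none => "unknown"
  | p :: rest, fallback =>
      if PySem.Set.contains pvKnownContentTypes p then p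
      else
        pvFusedLoop rest
          (if fallback = none ∧ (PySem.Str.startswith p "x_" || PySem.Str.startswith p "blog_") = true
           then some p else fallback)

def infer_content_type_py_alt (operation_name : String) : String :=
  pvFusedLoop ((((PySem.Str.split? operation_name ".").getD []).filter (fun p => p ≠ "")).reverse) none

-- ===== PRECONDITION & SPEC =====
def Spec_infer_content_type_py (operation_name : String) (out : String) : Prop := out = infer_content_type_py_alt operation_name
instance (operation_name : String) (out : String) : Decidable (Spec_infer_content_type_py operation_name out) := by unfold Spec_infer_content_type_py; infer_instance

-- ===== CLAIM (what is proved, stated in full; the proofs are below) =====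
def Claim_equal_infer_content_type_py : Prop := ∀ (operation_name : String), Dom_infer_content_type_py operation_name → Spec_infer_content_type_py operation_name (infer_content_type_py operation_name)

-- ===== LEMMAS AND PROOFS =====
theorem pvFusedLoop_eq (l : List String) (fallback : Option String) :
    pvFusedLoop l fallback =
      match pvScanKnown l with
      | some p => p
      | none =>
        match fallback with
        | some f => f
        | none =>
          match pvScanPrefix l with
          | some p => p
          | none => "unknown" := by
  induction l generalizing fallback with
  | nil => cases fallback <;> simp [pvFusedLoop, pvScanKnown, pvScanPrefix]
  | cons p rest ih =>
    simp only [pvFusedLoop, pvScanKnown, pvScanPrefix, ih]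
    split_ifs <;> cases fallback <;> simp_all

-- ===== VERDICT (by name: the statement is the Claim_ definition above) =====
theorem infer_content_type_py_spec : Claim_equal_infer_content_type_py := by
  intro s _
  unfold Spec_infer_content_type_py infer_content_type_py infer_content_type_py_alt
  rw [pvFusedLoop_eq]
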